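-- pv_equiv track=rewrite | github.com/paqui4ever/Algoritmos-y-Estructuras-de-Datos-I | Parciales Python/Parcial4.py | viajes_por_dia
-- ===== SOURCE A (Python) =====
-- def viajes_por_dia (viajes_diarios: dict[int, list[str]], usuarios: list[str]) -> dict[str, int]:
--     res: dict[str, int] = {}
--     for i in range(len(usuarios)):
--         contador = 0
--         for dia, personas in viajes_diarios.items():
--             for persona in personas:
--                 if persona == usuarios[i]:
--                     contador += 1
--                     res[usuarios[i]] = contador
--     return res
--
-- viajes_diarios = {1 : ["Juan", "Maria"], 2 : ["Marcela","Juan"]}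
--
-- usuarios = ["Juan", "Maria", "Marcela"]
-- ===== SOURCE B (Python) =====
-- def viajes_por_dia(viajes_diarios: dict[int, list[str]], usuarios: list[str]) -> dict[str, int]:
--     conteo: dict[str, int] = {}
--     for personas in viajes_diarios.values():
--         for p in personas:
--             conteo[p] = conteo.get(p, 0) + 1
--     return {u: conteo[u] for u in usuarios if u in conteo}
-- ===== Notes on version B (the rewrite author's own statement) =====
-- stated objective: faster
-- what changed: Instead of A's per-user rescan of every day's list (users x trips), B builds a count dictionary in one pass over all trip lists and then reads each user's count off it in a single pass over usuarios.
import Mathlib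
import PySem

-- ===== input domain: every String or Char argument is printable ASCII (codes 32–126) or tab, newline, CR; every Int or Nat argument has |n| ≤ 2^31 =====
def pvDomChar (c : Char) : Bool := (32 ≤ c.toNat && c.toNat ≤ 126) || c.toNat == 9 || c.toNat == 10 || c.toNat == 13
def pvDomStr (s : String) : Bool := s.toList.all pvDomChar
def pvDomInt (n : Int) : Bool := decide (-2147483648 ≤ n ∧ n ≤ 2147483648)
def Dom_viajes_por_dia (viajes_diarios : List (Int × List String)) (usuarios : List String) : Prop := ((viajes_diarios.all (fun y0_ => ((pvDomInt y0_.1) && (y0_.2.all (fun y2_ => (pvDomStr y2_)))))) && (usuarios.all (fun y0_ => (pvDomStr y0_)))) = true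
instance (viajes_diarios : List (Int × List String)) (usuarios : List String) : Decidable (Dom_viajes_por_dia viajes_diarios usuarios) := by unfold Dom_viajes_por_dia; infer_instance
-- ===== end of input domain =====

-- B replaces A's per-user rescan of every day's list by one counting pass over all
-- trip lists followed by one lookup pass over usuarios (objective: faster).

-- ===== PORT A =====
-- for i in range(len(usuarios)): contador = 0; for dia, personas in items: for persona in personas:
--   if persona == usuarios[i]: contador += 1; res[usuarios[i]] = contador
def viajes_por_dia (viajes_diarios : List (Int × List String)) (usuarios : List String) : List (String × Int) :=
  ((PySem.List.pyRange 0 (PySem.List.len usuarios) 1).foldl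
    (fun res i =>
      let u := PySem.List.pyGetD usuarios i ""
      (viajes_diarios.foldl
        (fun (st : Int × PySem.Dict String Int) dp =>
          dp.2.foldl
            (fun st persona =>
              if persona == u then (st.1 + 1, st.2.insert u (st.1 + 1)) else st)
            st)
        ((0 : Int), res)).2)
    (PySem.Dict.empty : PySem.Dict String Int)).items

-- ===== PORT B =====
-- conteo[p] = conteo.get(p, 0) + 1 over every personas list, then {u: conteo[u] for u in usuarios if u in conteo}
def viajes_por_dia_alt (viajes_diarios : List (Int × List String)) (usuarios : List String) : List (String × Int) :=
  let conteo : PySem.Dict String Int :=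
    viajes_diarios.foldl
      (fun c dp => dp.2.foldl (fun c p => c.insert p (c.getD p 0 + 1)) c)
      PySem.Dict.empty
  (usuarios.foldl
    (fun res u =>
      match conteo.get? u with
      | some v => res.insert u v
      | none => res)
    (PySem.Dict.empty : PySem.Dict String Int)).items

-- ===== PRECONDITION & SPEC =====
def Spec_viajes_por_dia (viajes_diarios : List (Int × List String)) (usuarios : List String) (out : List (String × Int)) : Prop := out = viajes_por_dia_alt viajes_diarios usuarios
instance (viajes_diarios : List (Int × List String)) (usuarios : List String) (out : List (String × Int)) : Decidable (Spec_viajes_por_dia viajes_diarios usuarios out) := by unfold Spec_viajes_por_dia; infer_instance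

-- ===== CLAIM (what is proved, stated in full; the proofs are below) =====
def Claim_equal_viajes_por_dia : Prop := ∀ (viajes_diarios : List (Int × List String)) (usuarios : List String), Dom_viajes_por_dia viajes_diarios usuarios → Spec_viajes_por_dia viajes_diarios usuarios (viajes_por_dia viajes_diarios usuarios)

-- ===== LEMMAS AND PROOFS =====

-- A's inner two loops over one user u, flattened to a single list l, compute
-- (k + count, res with u ↦ final count) — repeated overwrites collapse.
theorem vpd_inner_loop (l : List String) (u : String) (k : Int) (res : PySem.Dict String Int) :
    l.foldl (fun (st : Int × PySem.Dict String Int) persona =>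
        if persona == u then (st.1 + 1, st.2.insert u (st.1 + 1)) else st) (k, res)
      = (k + l.count u,
         if l.count u = 0 then res else res.insert u (k + l.count u)) := by
  induction l generalizing k res with
  | nil => simp
  | cons x l ih =>
    by_cases hx : x = u
    · subst hx
      simp only [List.foldl_cons, BEq.rfl, if_true, ih, List.count_cons_self,
        PySem.Dict.insert_insert_self, Prod.mk.injEq]
      refine ⟨by push_cast; ring, ?_⟩
      have h1 : l.count x + 1 ≠ 0 := by omega
      rw [if_neg h1]
      split_ifs with h0
      · simp [h0]
      · congr 1; push_cast; ring
    · simpa [hx, List.count_cons_of_ne (Ne.symm hx)] using ih k res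

-- total occurrence count of u over all days
theorem vpd_a_eq (viajes_diarios : List (Int × List String)) (usuarios : List String) :
    viajes_por_dia viajes_diarios usuarios =
      (usuarios.foldl
        (fun (res : PySem.Dict String Int) u =>
          if ((viajes_diarios.flatMap (·.2)).count u : Int) = 0 then res
          else res.insert u ((viajes_diarios.flatMap (·.2)).count u))
        PySem.Dict.empty).items := by
  unfold viajes_por_dia
  rw [PySem.List.foldl_pyRange_zero_pyGetD usuarios ""
    (fun res u =>
      (viajes_diarios.foldl
        (fun (st : Int × PySem.Dict String Int) dp =>
          dp.2.foldl
            (fun st persona =>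
              if persona == u then (st.1 + 1, st.2.insert u (st.1 + 1)) else st)
            st)
        ((0 : Int), res)).2)]
  congr 1
  apply PySem.List.foldl_congr_mem
  intro res u _
  rw [← List.foldl_flatMap, vpd_inner_loop]
  simp only [zero_add]
  by_cases h : (viajes_diarios.flatMap (·.2)).count u = 0
  · simp [h]
  · simp [h]

theorem vpd_b_eq (viajes_diarios : List (Int × List String)) (usuarios : List String) :
    viajes_por_dia_alt viajes_diarios usuarios =
      (usuarios.foldl
        (fun (res : PySem.Dict String Int) u =>
          if ((viajes_diarios.flatMap (·.2)).count u : Int) = 0 then res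
          else res.insert u ((viajes_diarios.flatMap (·.2)).count u))
        PySem.Dict.empty).items := by
  unfold viajes_por_dia_alt
  have hc : viajes_diarios.foldl
      (fun c dp => dp.2.foldl (fun c p => c.insert p (c.getD p 0 + 1)) c)
      PySem.Dict.empty
      = PySem.Dict.counter (viajes_diarios.flatMap (·.2)) := by
    rw [← List.foldl_flatMap, PySem.Dict.foldl_insert_getD_add_one_eq_counter]
  simp only [hc]
  congr 1
  apply PySem.List.foldl_congr_mem
  intro res u _
  have hget : (PySem.Dict.counter (viajes_diarios.flatMap (·.2))).get? u =
      if (viajes_diarios.flatMap (·.2)).count u = 0 then none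
      else some ((viajes_diarios.flatMap (·.2)).count u) := by
    by_cases h : (viajes_diarios.flatMap (·.2)).count u = 0
    · have hc0 : (viajes_diarios.flatMap (·.2)).contains u = false := by
        rw [List.contains_eq_mem]
        simp [List.count_eq_zero.mp h]
      have := PySem.Dict.contains_counter (viajes_diarios.flatMap (·.2)) u
      rw [hc0, PySem.Dict.contains_eq_isSome_get?] at this
      simp [h]
      exact Option.not_isSome_iff_eq_none.mp (by simp [this])
    · have hc1 : (viajes_diarios.flatMap (·.2)).contains u = true := by
        rw [List.contains_eq_mem]
        exact decide_eq_true (List.count_pos_iff.mp (Nat.pos_of_ne_zero h))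
      have hcon := PySem.Dict.contains_counter (viajes_diarios.flatMap (·.2)) u
      rw [hc1, PySem.Dict.contains_eq_isSome_get?] at hcon
      obtain ⟨v, hv⟩ := Option.isSome_iff_exists.mp hcon
      have := PySem.Dict.getD_counter (viajes_diarios.flatMap (·.2)) u
      rw [PySem.Dict.getD_eq_get?_getD, hv] at this
      simp at this
      simp [h, hv, this]
  rw [hget]
  by_cases h : (viajes_diarios.flatMap (·.2)).count u = 0
  · simp [h]
  · simp [h]

-- ===== VERDICT (by name: the statement is the Claim_ definition above) =====
theorem viajes_por_dia_spec : Claim_equal_viajes_por_dia := by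
  intro vd us _
  unfold Spec_viajes_por_dia
  rw [vpd_a_eq, vpd_b_eq]
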